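-- pv_equiv track=rewrite | github.com/caiooliveira54/ipc20161 | lista5/equipe2/ipc_lista5.04.py | examinar_repeticao
-- ===== SOURCE A (Python) =====
-- def examinar_repeticao(matriz,linha,coluna):
--     formar_matriz = []
--     for i in range(linha):
--         for j in range(coluna):
--             formar_matriz.append(matriz[i][j])
--     if(len(formar_matriz) == len(set(formar_matriz))):
--         return ("Os elementos nao se repetem")
--     else:
--         return ("Existe elementos que se repetem na matriz")
-- ===== SOURCE B (Python) =====
-- def examinar_repeticao(matriz, linha, coluna):
--     seen = set()
--     for i in range(linha):
--         for j in range(coluna):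
--             x = matriz[i][j]
--             if x in seen:
--                 return ("Existe elementos que se repetem na matriz")
--             seen.add(x)
--     return ("Os elementos nao se repetem")
-- ===== Notes on version B (the rewrite author's own statement) =====
-- stated objective: alternative
-- what changed: Instead of building the whole flattened list and comparing its length with the length of its set, B keeps an incrementally grown seen-set and returns the repeat string immediately at the first element already seen (early exit), never materialising the flat list.
import Mathlib
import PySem

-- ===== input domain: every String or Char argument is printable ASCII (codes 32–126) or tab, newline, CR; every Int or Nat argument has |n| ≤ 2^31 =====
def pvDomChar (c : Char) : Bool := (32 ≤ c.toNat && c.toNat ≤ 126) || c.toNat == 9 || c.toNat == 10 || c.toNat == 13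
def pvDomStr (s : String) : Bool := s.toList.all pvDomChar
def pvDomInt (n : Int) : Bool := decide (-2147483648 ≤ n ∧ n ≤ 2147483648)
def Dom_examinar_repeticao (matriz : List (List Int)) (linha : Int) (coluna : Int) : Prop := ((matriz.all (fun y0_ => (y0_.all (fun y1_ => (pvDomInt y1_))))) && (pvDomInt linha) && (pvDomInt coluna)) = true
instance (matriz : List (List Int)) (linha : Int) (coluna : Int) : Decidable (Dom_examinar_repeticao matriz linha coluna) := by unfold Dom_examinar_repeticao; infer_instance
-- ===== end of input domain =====

-- B replaces A's build-the-flat-list-then-compare-set-lengths strategy with a single early-exit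
-- scan that maintains an incrementally grown seen-set (objective: alternative decomposition).

-- ===== PORT A =====
-- matriz[i][j]: inside Pre_ the indices are in range; the .getD defaults are never reached there.
def examinar_repeticao (matriz : List (List Int)) (linha : Int) (coluna : Int) : String :=
  let formar_matriz : List Int :=
    (PySem.List.pyRange 0 linha 1).foldl (fun acc i =>
      (PySem.List.pyRange 0 coluna 1).foldl (fun acc2 j =>
        acc2 ++ [(PySem.List.pyGet? ((PySem.List.pyGet? matriz i).getD []) j).getD 0]) acc) []
  if (formar_matriz.length : Int) == PySem.Set.len (PySem.Set.ofList formar_matriz) then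
    "Os elementos nao se repetem"
  else
    "Existe elementos que se repetem na matriz"

-- ===== PORT B =====
-- inner loop 'for j in range(coluna)': none = early return on a repeated element
def pvScanCols (row : List Int) : List Int → PySem.Set Int → Option (PySem.Set Int)
  | [], seen => some seen
  | j :: js, seen =>
    let x := ((PySem.List.pyGet? row j).getD 0)
    if PySem.Set.contains seen x then none
    else pvScanCols row js (PySem.Set.add seen x)

-- outer loop 'for i in range(linha)'
def pvScanRows (matriz : List (List Int)) (coluna : Int) :
    List Int → PySem.Set Int → Option (PySem.Set Int)
  | [], seen => some seen
  | i :: is, seen =>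
    match pvScanCols ((PySem.List.pyGet? matriz i).getD []) (PySem.List.pyRange 0 coluna 1) seen with
    | none => none
    | some s => pvScanRows matriz coluna is s

def examinar_repeticao_alt (matriz : List (List Int)) (linha : Int) (coluna : Int) : String :=
  match pvScanRows matriz coluna (PySem.List.pyRange 0 linha 1) PySem.Set.empty with
  | none => "Existe elementos que se repetem na matriz"
  | some _ => "Os elementos nao se repetem"

-- ===== PRECONDITION & SPEC =====
-- Pre_ excludes exactly the inputs where Python A raises IndexError: some accessed
-- matriz[i][j] (0 ≤ i < linha, 0 ≤ j < coluna) is out of range.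
def Pre_examinar_repeticao (matriz : List (List Int)) (linha : Int) (coluna : Int) : Prop :=
  (0 < linha ∧ 0 < coluna) →
    (linha ≤ (matriz.length : Int) ∧ ∀ row ∈ matriz.take linha.toNat, coluna ≤ (row.length : Int))
instance (matriz : List (List Int)) (linha : Int) (coluna : Int) : Decidable (Pre_examinar_repeticao matriz linha coluna) := by unfold Pre_examinar_repeticao; infer_instance

def pvWitness_examinar_repeticao : List (List Int) × Int × Int := ([[1, 2], [3, 1]], 2, 2)

def Spec_examinar_repeticao (matriz : List (List Int)) (linha : Int) (coluna : Int) (out : String) : Prop := out = examinar_repeticao_alt matriz linha coluna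
instance (matriz : List (List Int)) (linha : Int) (coluna : Int) (out : String) : Decidable (Spec_examinar_repeticao matriz linha coluna out) := by unfold Spec_examinar_repeticao; infer_instance

-- ===== CLAIM (what is proved, stated in full; the proofs are below) =====
def Claim_equal_examinar_repeticao : Prop := ∀ (matriz : List (List Int)) (linha : Int) (coluna : Int), Dom_examinar_repeticao matriz linha coluna → Pre_examinar_repeticao matriz linha coluna → Spec_examinar_repeticao matriz linha coluna (examinar_repeticao matriz linha coluna)

-- ===== LEMMAS AND PROOFS =====

-- the generic early-exit scan over an already-flattened element list
def pvScanL : List Int → PySem.Set Int → Option (PySem.Set Int)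
  | [], s => some s
  | x :: l, s =>
    if PySem.Set.contains s x then none else pvScanL l (PySem.Set.add s x)

theorem pvScanCols_eq_scanL (row : List Int) (js : List Int) (s : PySem.Set Int) :
    pvScanCols row js s = pvScanL (js.map (fun j => (PySem.List.pyGet? row j).getD 0)) s := by
  induction js generalizing s with
  | nil => rfl
  | cons j js ih => simp [pvScanCols, pvScanL, ih]

theorem pvScanL_append (l₁ l₂ : List Int) (s : PySem.Set Int) :
    pvScanL (l₁ ++ l₂) s =
      match pvScanL l₁ s with
      | none => none
      | some t => pvScanL l₂ t := by
  induction l₁ generalizing s with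
  | nil => rfl
  | cons x l₁ ih =>
    simp only [List.cons_append, pvScanL]
    split_ifs with h
    · rfl
    · exact ih _

theorem pvScanRows_eq_scanL (matriz : List (List Int)) (coluna : Int) (is : List Int)
    (s : PySem.Set Int) :
    pvScanRows matriz coluna is s =
      pvScanL (is.flatMap (fun i =>
        (PySem.List.pyRange 0 coluna 1).map
          (fun j => (PySem.List.pyGet? ((PySem.List.pyGet? matriz i).getD []) j).getD 0))) s := by
  induction is generalizing s with
  | nil => rfl
  | cons i is ih =>
    simp only [pvScanRows, List.flatMap_cons, pvScanL_append, pvScanCols_eq_scanL]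
    cases pvScanL ((PySem.List.pyRange 0 coluna 1).map
        (fun j => (PySem.List.pyGet? ((PySem.List.pyGet? matriz i).getD []) j).getD 0)) s with
    | none => rfl
    | some t => exact ih t

theorem pvScanL_eq_none_iff (l : List Int) (s : PySem.Set Int) :
    pvScanL l s = none ↔ ¬ l.Nodup ∨ ∃ x ∈ l, x ∈ s := by
  induction l generalizing s with
  | nil => simp [pvScanL]
  | cons x l ih =>
    simp only [pvScanL]
    split_ifs with h
    · simp only [PySem.Set.contains, List.contains_eq_mem, decide_eq_true_eq] at h
      constructor
      · intro _; exact Or.inr ⟨x, List.mem_cons_self, h⟩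
      · intro _; rfl
    · simp only [PySem.Set.contains, List.contains_eq_mem, decide_eq_true_eq] at h
      rw [ih]
      simp only [List.nodup_cons, List.mem_cons]
      constructor
      · rintro (hn | ⟨y, hy, hmem⟩)
        · exact Or.inl (fun ⟨_, hn'⟩ => hn hn')
        · rcases (PySem.Set.mem_add s x y).mp hmem with h1 | rfl
          · exact Or.inr ⟨y, Or.inr hy, h1⟩
          · exact Or.inl (fun ⟨hx, _⟩ => hx hy)
      · rintro (hn | ⟨y, (rfl | hy), hmem⟩)
        · by_cases hx : x ∈ l
          · exact Or.inr ⟨x, hx, (PySem.Set.mem_add s x x).mpr (Or.inr rfl)⟩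
          · exact Or.inl (fun hn' => hn ⟨hx, hn'⟩)
        · exact absurd hmem h
        · exact Or.inr ⟨y, hy, (PySem.Set.mem_add s x y).mpr (Or.inl hmem)⟩

-- length of foldl Set.add: reaches s.length + l.length exactly when l is duplicate-free and new
theorem pvFoldl_add_length_le (l : List Int) (s : PySem.Set Int) :
    (l.foldl PySem.Set.add s).length ≤ s.length + l.length := by
  induction l generalizing s with
  | nil => simp
  | cons x l ih =>
    simp only [List.foldl_cons, List.length_cons]
    refine le_trans (ih (PySem.Set.add s x)) ?_
    unfold PySem.Set.add
    split_ifs with h; simp; simp; omega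

theorem pvFoldl_add_length_eq_iff (l : List Int) (s : PySem.Set Int) :
    (l.foldl PySem.Set.add s).length = s.length + l.length ↔
      l.Nodup ∧ ∀ x ∈ l, x ∉ s := by
  induction l generalizing s with
  | nil => simp
  | cons x l ih =>
    simp only [List.foldl_cons, List.length_cons, List.nodup_cons, List.mem_cons]
    by_cases hx : x ∈ s
    · have hadd : PySem.Set.add s x = s := by
        unfold PySem.Set.add
        simp [List.contains_eq_mem, hx]
      rw [hadd]
      have := pvFoldl_add_length_le l s
      constructor
      · intro h; omega
      · rintro ⟨_, hall⟩; exact absurd hx (hall x (Or.inl rfl))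
    · have hadd : PySem.Set.add s x = s ++ [x] := by
        unfold PySem.Set.add
        simp [List.contains_eq_mem, hx]
      rw [hadd]
      have h2 := ih (s ++ [x])
      have harith :
          (List.foldl PySem.Set.add (s ++ [x]) l).length = s.length + (l.length + 1) ↔
          (List.foldl PySem.Set.add (s ++ [x]) l).length = (s ++ [x]).length + l.length := by
        simp only [List.length_append, List.length_singleton]
        omega
      rw [harith, h2]
      simp only [List.mem_append, List.mem_singleton, not_or]
      constructor
      · rintro ⟨hn, hall⟩
        refine ⟨⟨fun hxl => (hall x hxl).2 rfl, hn⟩, ?_⟩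
        rintro y (rfl | hy)
        · exact hx
        · exact (hall y hy).1
      · rintro ⟨⟨hxl, hn⟩, hall⟩
        refine ⟨hn, fun y hy => ⟨?_, ?_⟩⟩
        · exact hall y (Or.inr hy)
        · rintro rfl; exact hxl hy

theorem pvOfList_length_eq_iff (l : List Int) :
    (PySem.Set.ofList l).length = l.length ↔ l.Nodup := by
  have h := pvFoldl_add_length_eq_iff l PySem.Set.empty
  simp only [PySem.Set.empty, List.length_nil, Nat.zero_add, List.not_mem_nil,
    not_false_iff, imp_true_iff, and_true] at h
  simpa [PySem.Set.ofList, PySem.Set.empty] using h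

theorem pvFlatMap_singleton {α β : Type} (l : List α) (f : α → β) :
    l.flatMap (fun j => [f j]) = l.map f := by
  induction l with
  | nil => rfl
  | cons a l ih => simp [ih]

theorem pvPorts_agree (matriz : List (List Int)) (linha : Int) (coluna : Int) :
    examinar_repeticao matriz linha coluna = examinar_repeticao_alt matriz linha coluna := by
  unfold examinar_repeticao examinar_repeticao_alt
  rw [pvScanRows_eq_scanL]
  set elems : List Int :=
    (PySem.List.pyRange 0 linha 1).flatMap (fun i =>
      (PySem.List.pyRange 0 coluna 1).map
        (fun j => (PySem.List.pyGet? ((PySem.List.pyGet? matriz i).getD []) j).getD 0)) with helems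
  have hformar :
      (PySem.List.pyRange 0 linha 1).foldl (fun acc i =>
        (PySem.List.pyRange 0 coluna 1).foldl (fun acc2 j =>
          acc2 ++ [(PySem.List.pyGet? ((PySem.List.pyGet? matriz i).getD []) j).getD 0]) acc) [] = elems := by
    have hinner : ∀ (i : Int) (acc : List Int),
        (PySem.List.pyRange 0 coluna 1).foldl (fun acc2 j =>
          acc2 ++ [(PySem.List.pyGet? ((PySem.List.pyGet? matriz i).getD []) j).getD 0]) acc =
        acc ++ (PySem.List.pyRange 0 coluna 1).map
          (fun j => (PySem.List.pyGet? ((PySem.List.pyGet? matriz i).getD []) j).getD 0) := by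
      intro i acc
      have := PySem.List.foldl_append_eq_flatMap
        (fun j => [(PySem.List.pyGet? ((PySem.List.pyGet? matriz i).getD []) j).getD 0])
        (PySem.List.pyRange 0 coluna 1) acc
      rw [this, pvFlatMap_singleton]
    rw [PySem.List.foldl_congr_mem _ _ _ _ (fun acc i _ => hinner i acc)]
    · rw [PySem.List.foldl_append_eq_flatMap]
      simp [helems]
  rw [hformar]
  by_cases hnd : elems.Nodup
  · have hlen : (elems.length : Int) = PySem.Set.len (PySem.Set.ofList elems) := by
      unfold PySem.Set.len
      exact_mod_cast ((pvOfList_length_eq_iff elems).mpr hnd).symm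
    have hscan : pvScanL elems PySem.Set.empty ≠ none := by
      rw [Ne, pvScanL_eq_none_iff]
      rintro (h | ⟨x, _, hx⟩)
      · exact h hnd
      · simp [PySem.Set.empty] at hx
    rw [if_pos (beq_iff_eq.mpr hlen)]
    cases hsc : pvScanL elems PySem.Set.empty with
    | none => exact absurd hsc hscan
    | some t => rfl
  · have hlen : ¬ (elems.length : Int) = PySem.Set.len (PySem.Set.ofList elems) := by
      unfold PySem.Set.len
      intro h
      have h' : (PySem.Set.ofList elems).length = elems.length := by exact_mod_cast h.symm
      exact hnd ((pvOfList_length_eq_iff elems).mp h')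
    rw [if_neg (by simpa using hlen)]
    have hscan : pvScanL elems PySem.Set.empty = none :=
      (pvScanL_eq_none_iff _ _).mpr (Or.inl hnd)
    rw [hscan]

-- ===== VERDICT (by name: the statement is the Claim_ definition above) =====
theorem examinar_repeticao_spec : Claim_equal_examinar_repeticao := by
  intro matriz linha coluna _ _
  unfold Spec_examinar_repeticao
  exact pvPorts_agree matriz linha coluna
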